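-- pv_equiv track=rewrite | github.com/seatedSinger/GoogleKickStart | Round C/countdown.py | func
-- ===== SOURCE A (Python) =====
-- def func(arr, K):
--     res = 0
--     target = K
--     for i in range(len(arr)):
--         if arr[i] != target:
--             target = K
--         if arr[i] == target:
--             target -= 1
--             if target == 0:
--                 res += 1
--                 target = K
--     return res
-- ===== SOURCE B (Python) =====
-- def func(arr, K):
--     if K <= 0 or K > len(arr):
--         return 0
--     pattern = list(range(K, 0, -1))
--     count = 0
--     for i in range(len(arr) - K + 1):
--         if arr[i:i + K] == pattern:
--             count += 1
--     return count
-- ===== Notes on version B (the rewrite author's own statement) =====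
-- stated objective: alternative
-- what changed: A's single-pass resettable countdown state machine is replaced by building the target pattern [K..1] once and counting sliding windows arr[i:i+K] equal to it (matches of this pattern cannot overlap, so the window count equals the state-machine count).
import Mathlib
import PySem

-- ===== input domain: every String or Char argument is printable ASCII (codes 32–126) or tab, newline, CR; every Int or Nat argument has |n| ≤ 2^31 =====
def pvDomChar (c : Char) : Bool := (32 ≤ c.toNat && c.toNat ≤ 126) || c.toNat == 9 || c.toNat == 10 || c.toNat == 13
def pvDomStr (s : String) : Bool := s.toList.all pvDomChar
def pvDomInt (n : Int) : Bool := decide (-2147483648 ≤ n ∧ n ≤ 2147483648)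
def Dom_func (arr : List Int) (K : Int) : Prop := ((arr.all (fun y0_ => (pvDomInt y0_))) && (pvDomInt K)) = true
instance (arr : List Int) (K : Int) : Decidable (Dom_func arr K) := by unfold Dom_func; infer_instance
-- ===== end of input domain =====

-- B replaces A's resettable countdown state machine by a build-pattern-then-window-scan count; same return value (alternative decomposition, not claimed faster).

-- ===== PORT A =====
-- the loop body of A: state is (res, target); 'for i in range(len(arr)): arr[i]' visits the elements in order
def funcStep (K : Int) (s : Int × Int) (x : Int) : Int × Int :=
  let target := if x ≠ s.2 then K else s.2
  if x = target then
    let target := target - 1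
    if target = 0 then (s.1 + 1, K) else (s.1, target)
  else (s.1, target)

def func (arr : List Int) (K : Int) : Int :=
  (arr.foldl (funcStep K) (0, K)).1

-- ===== PORT B =====
-- pattern = list(range(K, 0, -1))
def funcPat (K : Int) : List Int := PySem.List.pyRange K 0 (-1)

def func_alt (arr : List Int) (K : Int) : Int :=
  if K ≤ 0 ∨ (arr.length : Int) < K then 0
  else
    (PySem.List.pyRange 0 ((arr.length : Int) - K + 1) 1).foldl
      (fun count i =>
        if PySem.List.slice arr (some i) (some (i + K)) = funcPat K then count + 1 else count)
      0

-- ===== PRECONDITION & SPEC =====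
def Spec_func (arr : List Int) (K : Int) (out : Int) : Prop := out = func_alt arr K
instance (arr : List Int) (K : Int) (out : Int) : Decidable (Spec_func arr K out) := by unfold Spec_func; infer_instance

-- ===== CLAIM (what is proved, stated in full; the proofs are below) =====
def Claim_equal_func : Prop := ∀ (arr : List Int) (K : Int), Dom_func arr K → Spec_func arr K (func arr K)

-- ===== LEMMAS AND PROOFS =====

-- the common characterisation: number of windows of arr matching the pattern
def gR (K : Int) : List Int → Int
  | [] => 0
  | x :: rest => (if funcPat K <+: (x :: rest) then 1 else 0) + gR K rest

lemma funcPat_cons (t : Int) (h : 0 < t) : funcPat t = t :: funcPat (t - 1) := by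
  simpa [funcPat] using PySem.List.pyRange_neg_one_cons (a := t) (b := 0) h

lemma funcPat_length (K : Int) : (funcPat K).length = K.toNat := by
  simp [funcPat, PySem.List.length_pyRange_neg_one]

-- A-side: the state machine, started in any live state, counts windows (plus the
-- pending partial match when target < K)
lemma machine_count (K : Int) (l : List Int) :
    ∀ (t res : Int), 1 ≤ t → t ≤ K →
      (l.foldl (funcStep K) (res, t)).1
        = res + (if t < K ∧ funcPat t <+: l then 1 else 0) + gR K l := by
  induction l with
  | nil =>
      intro t res h1 h2
      have : ¬ (funcPat t <+: ([] : List Int)) := by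
        intro h
        have := h.length_le
        simp [funcPat_length] at this
        omega
      simp [gR, this]
  | cons x rest ih =>
      intro t res h1 h2
      have hpatK : funcPat K = K :: funcPat (K - 1) := funcPat_cons K (by omega)
      have hpatt : funcPat t = t :: funcPat (t - 1) := funcPat_cons t (by omega)
      by_cases hxt : x = t
      · -- element matches the current target
        by_cases ht1 : t = 1
        · -- completes a countdown
          have hstep : funcStep K (res, t) x = (res + 1, K) := by
            simp [funcStep, hxt, ht1]
          have hpre : funcPat t <+: (x :: rest) := by
            rw [hpatt, ht1]
            simp [funcPat, PySem.List.pyRange_neg_one_eq_nil, hxt, ht1]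
          rw [List.foldl_cons, hstep, ih K (res + 1) (by omega) le_rfl]
          by_cases hK1 : K = 1
          · have hpre' : funcPat K <+: (x :: rest) := by rw [hK1, ← ht1]; exact hpre
            simp [gR, hpre', show ¬ (t < K) by omega]
            omega
          · have hnpre : ¬ (funcPat K <+: (x :: rest)) := by
              rw [hpatK]; intro h
              have he := (List.cons_prefix_cons.mp h).1
              omega
            simp [gR, hpre, hnpre, show t < K by omega]
        · -- continues the countdown
          have hstep : funcStep K (res, t) x = (res, t - 1) := by
            simp [funcStep, hxt, sub_eq_zero, ht1]
          rw [List.foldl_cons, hstep, ih (t - 1) res (by omega) (by omega)]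
          have hiff : (funcPat t <+: (x :: rest)) ↔ (funcPat (t-1) <+: rest) := by
            rw [hpatt]; exact List.cons_prefix_cons.trans (by simp [hxt])
          by_cases htK : t = K
          · have hiff' : (funcPat K <+: (x :: rest)) ↔ (funcPat (K-1) <+: rest) := htK ▸ hiff
            simp [gR, hiff', htK, show (K:Int) - 1 < K by omega]
            by_cases hp : funcPat (K - 1) <+: rest <;> simp [hp] <;> omega
          · have htK' : t < K := lt_of_le_of_ne h2 htK
            have hnpre : ¬ (funcPat K <+: (x :: rest)) := by
              rw [hpatK]; intro h
              have he := (List.cons_prefix_cons.mp h).1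
              omega
            simp [gR, hnpre, hiff, htK', show t - 1 < K by omega]
      · -- mismatch: reset to K, then the element may itself start a countdown
        have hnpret : ¬ (t < K ∧ funcPat t <+: (x :: rest)) := by
          rintro ⟨htK, h⟩
          rw [hpatt] at h
          have he := (List.cons_prefix_cons.mp h).1
          omega
        by_cases hxK : x = K
        · -- starts a fresh countdown (t < K here since x = K ≠ t)
          have htK : t < K := by omega
          have hK2 : (2:Int) ≤ K := by omega
          have hKt : K ≠ t := by omega
          have hstep : funcStep K (res, t) x = (res, K - 1) := by
            simp [funcStep, hxK, hKt, sub_eq_zero, show K ≠ 1 by omega]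
          rw [List.foldl_cons, hstep, ih (K - 1) res (by omega) (by omega)]
          have hiff : (funcPat K <+: (x :: rest)) ↔ (funcPat (K-1) <+: rest) := by
            rw [hpatK]; exact List.cons_prefix_cons.trans (by simp [hxK])
          simp [gR, hnpret, hiff, show K - 1 < K by omega]
          by_cases hp : funcPat (K - 1) <+: rest <;> simp [hp] <;> omega
        · -- full reset
          have hstep : funcStep K (res, t) x = (res, K) := by
            simp [funcStep, hxt, hxK]
          have hnpre : ¬ (funcPat K <+: (x :: rest)) := by
            rw [hpatK]; intro h
            have he := (List.cons_prefix_cons.mp h).1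
            omega
          rw [List.foldl_cons, hstep, ih K res (by omega) le_rfl]
          simp [gR, hnpret, hnpre]

lemma machine_nonpos (K : Int) (hK : K ≤ 0) (l : List Int) :
    ∀ (t res : Int), t ≤ 0 → (l.foldl (funcStep K) (res, t)).1 = res := by
  induction l with
  | nil => intro t res _; simp
  | cons x rest ih =>
      intro t res ht
      rw [List.foldl_cons]
      by_cases hxt : x = t
      · have hstep : funcStep K (res, t) x = (res, t - 1) := by
          simp [funcStep, hxt, sub_eq_zero, show t ≠ 1 by omega]
        rw [hstep]; exact ih (t - 1) res (by omega)
      · by_cases hxK : x = K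
        · have hKt : K ≠ t := by omega
          have hstep : funcStep K (res, t) x = (res, K - 1) := by
            simp [funcStep, hxK, hKt, sub_eq_zero, show K ≠ 1 by omega]
          rw [hstep]; exact ih (K - 1) res (by omega)
        · have hstep : funcStep K (res, t) x = (res, K) := by
            simp [funcStep, hxt, hxK]
          rw [hstep]; exact ih K res hK

-- counting fold = countP
lemma foldl_count {α : Type} (p : α → Prop) [DecidablePred p] (l : List α) :
    ∀ c : Int, (l.foldl (fun c i => if p i then c + 1 else c) c)
      = c + (l.countP (fun i => decide (p i)) : Int) := by
  induction l with
  | nil => intro c; simp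
  | cons x rest ih =>
      intro c
      rw [List.foldl_cons, List.countP_cons]
      by_cases hx : p x
      · rw [if_pos hx, ih]
        simp [hx]
        omega
      · rw [if_neg hx, ih]
        simp [hx]

-- gR as a countP over all start indices
lemma gR_countP (K : Int) (l : List Int) :
    gR K l = ((List.range l.length).countP (fun i => decide (funcPat K <+: l.drop i)) : Int) := by
  induction l with
  | nil => simp [gR]
  | cons x rest ih =>
      have hdrop : ∀ i : Nat, (decide (funcPat K <+: (x :: rest).drop (i + 1)))
          = decide (funcPat K <+: rest.drop i) := by
        intro i
        simp [decide_eq_decide]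
      rw [show (x :: rest).length = rest.length + 1 from rfl, List.range_succ_eq_map,
        List.countP_cons, List.countP_map]
      simp only [Function.comp_def, Nat.succ_eq_add_one, hdrop]
      by_cases hp : funcPat K <+: (x :: rest) <;> simp [gR, hp, ih] <;> omega

-- B-side: the window scan computes gR
lemma alt_eq_gR (arr : List Int) (K : Int) (hK : 1 ≤ K) (hbig : K ≤ (arr.length : Int)) :
    func_alt arr K = gR K arr := by
  have hKnn : (0:Int) ≤ K := by omega
  rw [func_alt, if_neg (by omega), PySem.List.pyRange_one 0 ((arr.length : Int) - K + 1)]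
  rw [List.foldl_map]
  rw [foldl_count (fun k : Nat =>
        PySem.List.slice arr (some ((0:Int) + k)) (some ((0:Int) + k + K)) = funcPat K)
      (List.range (((arr.length : Int) - K + 1 - 0)).toNat) 0]
  have hpred : ∀ i : Nat,
      (decide (PySem.List.slice arr (some ((0:Int) + i)) (some ((0:Int) + i + K)) = funcPat K))
        = decide (funcPat K <+: arr.drop i) := by
    intro i
    have hs : PySem.List.slice arr (some ((0:Int) + i)) (some ((0:Int) + i + K))
        = (arr.drop i).take K.toNat := by
      have h1 : (0:Int) + i + K = ((i : Int) + (K.toNat : Int)) := by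
        rw [Int.toNat_of_nonneg hKnn]; ring
      rw [h1, zero_add, ← Int.natCast_add, PySem.List.slice_natCast]
      congr 1; omega
    have h2 : (funcPat K <+: arr.drop i) ↔ ((arr.drop i).take K.toNat = funcPat K) := by
      rw [List.prefix_iff_eq_take, funcPat_length, eq_comm]
    rw [hs]
    simp [h2]
  rw [gR_countP]
  set m : Nat := (((arr.length : Int) - K + 1 - 0)).toNat with hm
  -- starts past length - K never match (window too short)
  obtain ⟨d, hd⟩ : ∃ d, arr.length = m + d := ⟨arr.length - m, by omega⟩
  rw [hd, List.range_add, List.countP_append]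
  have hzero : (List.countP (fun i => decide (funcPat K <+: arr.drop i))
      ((List.range d).map (fun i => m + i))) = 0 := by
    rw [List.countP_eq_zero]
    intro i hi
    simp only [List.mem_map] at hi
    obtain ⟨j, hj, rfl⟩ := hi
    simp only [decide_eq_true_eq]
    intro hpre
    have hlen := hpre.length_le
    rw [funcPat_length, List.length_drop] at hlen
    omega
  rw [hzero]
  simp only [hpred]
  push_cast
  omega

-- gR is 0 when the pattern is longer than the array
lemma gR_big (K : Int) (arr : List Int) (h : (arr.length : Int) < K) : gR K arr = 0 := by
  rw [gR_countP]
  have : (List.range arr.length).countP (fun i => decide (funcPat K <+: arr.drop i)) = 0 := by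
    rw [List.countP_eq_zero]
    intro i _
    simp only [decide_eq_true_eq]
    intro hpre
    have hlen := hpre.length_le
    rw [funcPat_length, List.length_drop] at hlen
    omega
  rw [this]
  rfl

-- ===== VERDICT (by name: the statement is the Claim_ definition above) =====
theorem func_spec : Claim_equal_func := by
  intro arr K _
  unfold Spec_func
  by_cases hK : K ≤ 0
  · rw [func, machine_nonpos K hK arr K 0 hK, func_alt, if_pos (Or.inl hK)]
  · by_cases hbig : (arr.length : Int) < K
    · rw [func, machine_count K arr K 0 (by omega) le_rfl, func_alt, if_pos (Or.inr hbig),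
        gR_big K arr hbig]
      simp
    · rw [func, machine_count K arr K 0 (by omega) le_rfl,
        alt_eq_gR arr K (by omega) (by omega)]
      simp
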